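-- pv_equiv track=rewrite | github.com/Ressetkk/GITSpy | app.py | _generateLanguageStats
-- ===== SOURCE A (Python) =====
-- def _generateLanguageStats(repos):
--     """
--     For each repository check how many language occurencies there is and write statistics.
--     IN: Repository JSONList
--     OUT: JSONObject with occurencies
--     """
--     languageStats = {}
--     for repo in repos:
--         lang = repo['language']
--         if lang == None:
--             lang = "Not specified"
--         if lang in languageStats:
--             languageStats[lang] += 1
--         else:
--             languageStats[lang] = 1
--     return(languageStats)
-- ===== SOURCE B (Python) =====
-- def _generateLanguageStats(repos):
--     langs = [r['language'] if r['language'] is not None else "Not specified" for r in repos]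
--     out = {}
--     for lang in dict.fromkeys(langs):
--         out[lang] = langs.count(lang)
--     return out
-- ===== Notes on version B (the rewrite author's own statement) =====
-- stated objective: alternative
-- what changed: Replaces the one-pass hash-accumulation loop (check membership, then increment or initialise) by a two-phase pipeline: normalise all languages into a list, dedup it in first-occurrence order, and count each distinct language with list.count.
import Mathlib
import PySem

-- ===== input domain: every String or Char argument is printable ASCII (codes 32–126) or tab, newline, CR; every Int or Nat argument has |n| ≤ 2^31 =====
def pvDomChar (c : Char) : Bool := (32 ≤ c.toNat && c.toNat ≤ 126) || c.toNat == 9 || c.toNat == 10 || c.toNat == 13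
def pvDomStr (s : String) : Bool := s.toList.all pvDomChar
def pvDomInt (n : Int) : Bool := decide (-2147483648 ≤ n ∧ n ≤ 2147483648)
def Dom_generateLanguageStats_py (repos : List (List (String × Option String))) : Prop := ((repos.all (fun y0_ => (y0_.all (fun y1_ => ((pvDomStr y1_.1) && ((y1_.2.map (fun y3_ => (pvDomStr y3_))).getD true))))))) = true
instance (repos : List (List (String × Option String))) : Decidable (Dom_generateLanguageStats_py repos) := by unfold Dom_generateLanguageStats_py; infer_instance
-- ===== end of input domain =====

-- B replaces A's one-pass membership-test-and-increment dict accumulation by a normalise/dedup/count pipeline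
-- (objective: alternative structure, same result); equivalence proved on repos whose every entry has a "language" key.

-- ===== PORT A =====
-- repo['language'] with None replaced by "Not specified" (shared by both ports; the 'none' case, a
-- missing key = Python KeyError, is excluded by Pre_ below).
def pvNorm (r : List (String × Option String)) : String :=
  match PySem.Dict.get? (PySem.Dict.mk r) "language" with
  | some (some s) => s
  | _ => "Not specified"

-- A's loop: 'if lang in languageStats: += 1 else: = 1' over a dict accumulator.
def generateLanguageStats_py (repos : List (List (String × Option String))) : List (String × Int) :=
  (repos.foldl (fun stats repo =>
      let lang := pvNorm repo
      if stats.contains lang then stats.insert lang (stats.getD lang 0 + 1)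
      else stats.insert lang 1)
    PySem.Dict.empty).items

-- ===== PORT B =====
-- B: normalise every repo's language into a list, then one entry per first-occurrence-distinct
-- language ('dict.fromkeys') carrying its langs.count.
def generateLanguageStats_py_alt (repos : List (List (String × Option String))) : List (String × Int) :=
  let langs := repos.map pvNorm
  (PySem.List.dedup langs).foldl (fun out lang => out ++ [(lang, (langs.count lang : Int))]) []

-- ===== PRECONDITION & SPEC =====
-- Pre_ excludes exactly the repos missing a "language" key, on which Python A (and B) raise KeyError.
def Pre_generateLanguageStats_py (repos : List (List (String × Option String))) : Prop :=
  ∀ repo ∈ repos, (PySem.Dict.mk repo).contains "language" = true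
instance (repos : List (List (String × Option String))) : Decidable (Pre_generateLanguageStats_py repos) := by unfold Pre_generateLanguageStats_py; infer_instance
def pvWitness_generateLanguageStats_py : (List (List (String × Option String))) :=
  [[("language", some "C")], [("language", none)], [("language", some "C")]]

def Spec_generateLanguageStats_py (repos : List (List (String × Option String))) (out : List (String × Int)) : Prop := out = generateLanguageStats_py_alt repos
instance (repos : List (List (String × Option String))) (out : List (String × Int)) : Decidable (Spec_generateLanguageStats_py repos out) := by unfold Spec_generateLanguageStats_py; infer_instance

-- ===== CLAIM (what is proved, stated in full; the proofs are below) =====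
def Claim_equal_generateLanguageStats_py : Prop := ∀ (repos : List (List (String × Option String))), Dom_generateLanguageStats_py repos → Pre_generateLanguageStats_py repos → Spec_generateLanguageStats_py repos (generateLanguageStats_py repos)

-- ===== LEMMAS AND PROOFS =====

-- A's loop body is exactly the Counter step d.modify x 0 (· + 1).
theorem pv_step_eq_modify (d : PySem.Dict String Int) (x : String) :
    (if d.contains x then d.insert x (d.getD x 0 + 1) else d.insert x 1) =
      d.modify x 0 (· + 1) := by
  unfold PySem.Dict.modify PySem.Dict.getD
  split
  · rfl
  · rename_i h
    have h2 : d.get? x = none := by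
      simp only [PySem.Dict.contains, Bool.not_eq_true, List.any_eq_false] at h
      simp only [PySem.Dict.get?, Option.map_eq_none_iff]
      exact List.find?_eq_none.mpr (fun p hp => by simpa using h p hp)
    rw [h2]
    rfl

-- A's fold over repos is the Counter fold over the normalised language list.
theorem pv_foldA (repos : List (List (String × Option String))) (d : PySem.Dict String Int) :
    repos.foldl (fun stats repo =>
        let lang := pvNorm repo
        if stats.contains lang then stats.insert lang (stats.getD lang 0 + 1)
        else stats.insert lang 1) d =
      (repos.map pvNorm).foldl (fun d x => d.modify x 0 (· + 1)) d := by
  simp only [pv_step_eq_modify, List.foldl_map]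

-- ===== VERDICT (by name: the statement is the Claim_ definition above) =====
theorem generateLanguageStats_py_spec : Claim_equal_generateLanguageStats_py := by
  intro repos _ _
  unfold Spec_generateLanguageStats_py generateLanguageStats_py generateLanguageStats_py_alt
  rw [pv_foldA, ← PySem.Dict.counter_eq_foldl, PySem.Dict.items_counter,
      PySem.List.foldl_append_singleton_eq_map, PySem.List.dedup_eq_ofList]
  simp
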